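-- pv_equiv track=rewrite | github.com/Midox04/TIPE | Méthode Yani /DOBBLE.py | algorithmerajoute3
-- ===== SOURCE A (Python) =====
-- def cardinalun(l1,l2):
--     l = l1+l2
--     list.sort(l)
--     s = 0
--     for i in range(len(l)-1):
--         if l[i]==l[i+1]:
--             s+=1
--     if s == 1:
--         return True
--     else:
--         return False
--
-- def algorithmerajoute3(l,j,g):
--     n = len(l)
--     nn = len(g)
--     booll1 = True
--     i = j
--     s = 0
--     while i<nn and booll1:
--         booll2 = True
--         k = 0
--         while k<n and booll2:
--             if not cardinalun(g[i],l[k]):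
--                 booll2 = False
--             k += 1
--         if booll2 and k==n:
--             booll1 = False
--             s = g[i]
--         else:
--             i+=1
--     if s!=0:
--         return l+[s],i
--     else:
--         return l,i
-- ===== SOURCE B (Python) =====
-- def algorithmerajoute3(l, j, g):
--     nn = len(g)
--     for i in range(j, nn):
--         c = g[i]
--         if all(len(c) + len(x) - len(set(c + x)) == 1 for x in l):
--             return l + [c], i
--     return l, max(j, nn)
-- ===== Notes on version B (the rewrite author's own statement) =====
-- stated objective: simpler
-- what changed: The helper's sort-then-count-adjacent-duplicates test is replaced by the set-cardinality formula len(c)+len(x)-len(set(c+x))==1, and the flag-driven nested while loops become a single for over range(j, len(g)) with all() and an early return.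
import Mathlib
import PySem

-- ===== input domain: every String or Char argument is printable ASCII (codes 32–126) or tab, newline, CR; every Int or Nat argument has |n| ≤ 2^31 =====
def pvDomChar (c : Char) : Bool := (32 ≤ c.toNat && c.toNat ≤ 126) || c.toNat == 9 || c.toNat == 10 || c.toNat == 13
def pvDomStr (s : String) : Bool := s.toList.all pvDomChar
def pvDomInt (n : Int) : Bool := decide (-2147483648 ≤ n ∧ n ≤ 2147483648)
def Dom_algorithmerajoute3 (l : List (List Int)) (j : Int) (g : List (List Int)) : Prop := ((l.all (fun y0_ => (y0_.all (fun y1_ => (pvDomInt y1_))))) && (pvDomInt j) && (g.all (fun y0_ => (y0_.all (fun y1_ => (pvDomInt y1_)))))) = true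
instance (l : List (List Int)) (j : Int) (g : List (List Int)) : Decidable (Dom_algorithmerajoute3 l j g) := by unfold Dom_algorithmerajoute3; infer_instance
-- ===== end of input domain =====

-- B replaces the sort-and-count-adjacent-duplicates helper by a set-cardinality formula and the
-- flag-driven nested while loops by a single scan with all(); objective: simpler.

-- ===== PORT A =====
-- port of cardinalun: sort l1+l2, count equal adjacent pairs, test s == 1
def cardinalun (l1 l2 : List Int) : Bool :=
  let l := PySem.List.sorted (l1 ++ l2) (fun x => x) false
  let s : Int := (PySem.List.pyRange 0 ((l.length : Int) - 1) 1).foldl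
    (fun s i => if PySem.List.pyGetD l i 0 = PySem.List.pyGetD l (i + 1) 0 then s + 1 else s) 0
  s == 1

-- inner 'while k<n and booll2' loop; returns (booll2, k)
def innerA (l : List (List Int)) (c : List Int) (n k : Int) (booll2 : Bool) : Bool × Int :=
  if _h : k < n ∧ booll2 = true then
    let b2 := if ¬ (cardinalun c (PySem.List.pyGetD l k []) = true) then false else booll2
    innerA l c n (k + 1) b2
  else (booll2, k)
termination_by (n - k).toNat
decreasing_by omega

-- outer 'while i<nn and booll1' loop; the flag-break 'booll1 = False; s = g[i]' becomes the
-- early return (i, some c); returns (final i, s as an Option since Python's sentinel is int 0)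
def outerA (l g : List (List Int)) (n nn i : Int) : Int × Option (List Int) :=
  if _h : i < nn then
    match PySem.List.pyGet? g i with
    | none => (i, none)   -- Python raises IndexError here; excluded by Pre_
    | some c =>
      let r := innerA l c n 0 true
      if r.1 = true ∧ r.2 = n then (i, some c)
      else outerA l g n nn (i + 1)
  else (i, none)
termination_by (nn - i).toNat
decreasing_by omega

def algorithmerajoute3 (l : List (List Int)) (j : Int) (g : List (List Int)) : List (List Int) × Int :=
  let n : Int := l.length
  let nn : Int := g.length
  let r := outerA l g n nn j
  match r.2 with
  | some s => (l ++ [s], r.1)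
  | none => (l, r.1)

-- ===== PORT B =====
-- len(c) + len(x) - len(set(c + x)) == 1
def shares1 (c x : List Int) : Bool :=
  ((c.length : Int) + (x.length : Int) - ((PySem.Set.ofList (c ++ x)).length : Int)) == 1

-- 'for i in range(j, nn): … return l+[c], i' ported as recursion over the range list
def bloop (l g : List (List Int)) : List Int → Option (List (List Int) × Int)
  | [] => none
  | i :: rest =>
    match PySem.List.pyGet? g i with
    | none => none   -- Python raises IndexError here; excluded by Pre_
    | some c =>
      if l.all (fun x => shares1 c x) then some (l ++ [c], i)
      else bloop l g rest

def algorithmerajoute3_alt (l : List (List Int)) (j : Int) (g : List (List Int)) : List (List Int) × Int :=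
  let nn : Int := g.length
  match bloop l g (PySem.List.pyRange j nn 1) with
  | some r => r
  | none => (l, max j nn)

-- ===== PRECONDITION & SPEC =====
-- Pre_ excludes j < -len(g), where Python A raises IndexError on g[i] (B raises there too).
def Pre_algorithmerajoute3 (_l : List (List Int)) (j : Int) (g : List (List Int)) : Prop :=
  -(g.length : Int) ≤ j
instance (l : List (List Int)) (j : Int) (g : List (List Int)) : Decidable (Pre_algorithmerajoute3 l j g) := by unfold Pre_algorithmerajoute3; infer_instance
def pvWitness_algorithmerajoute3 : List (List Int) × Int × List (List Int) := ([[1, 2]], 0, [[2, 3]])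

def Spec_algorithmerajoute3 (l : List (List Int)) (j : Int) (g : List (List Int)) (out : List (List Int) × Int) : Prop := out = algorithmerajoute3_alt l j g
instance (l : List (List Int)) (j : Int) (g : List (List Int)) (out : List (List Int) × Int) : Decidable (Spec_algorithmerajoute3 l j g out) := by unfold Spec_algorithmerajoute3; infer_instance

-- ===== CLAIM (what is proved, stated in full; the proofs are below) =====
def Claim_equal_algorithmerajoute3 : Prop := ∀ (l : List (List Int)) (j : Int) (g : List (List Int)), Dom_algorithmerajoute3 l j g → Pre_algorithmerajoute3 l j g → Spec_algorithmerajoute3 l j g (algorithmerajoute3 l j g)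

-- ===== LEMMAS AND PROOFS =====

-- number of equal adjacent pairs
def adjCount : List Int → Nat
  | a :: b :: t => (if a = b then 1 else 0) + adjCount (b :: t)
  | _ => 0

-- A's counting loop computes adjCount (Nat-index form)
theorem countP_range_adj (m : List Int) :
    (List.range (m.length - 1)).countP (fun k => decide (m.getD k 0 = m.getD (k + 1) 0))
      = adjCount m := by
  match m with
  | [] => simp [adjCount]
  | [a] => simp [adjCount]
  | a :: b :: t =>
    have ih := countP_range_adj (b :: t)
    simp only [List.length_cons, Nat.add_sub_cancel] at *
    rw [List.range_succ_eq_map]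
    simp only [List.countP_cons, List.countP_map, adjCount]
    have h2 : ((List.range (b :: t).length.pred).countP
        ((fun k => decide ((a :: b :: t).getD k 0 = (a :: b :: t).getD (k + 1) 0)) ∘ Nat.succ))
        = (List.range t.length).countP (fun k => decide ((b :: t).getD k 0 = (b :: t).getD (k + 1) 0)) := by
      apply List.countP_congr
      intro k _
      simp
    simp only [List.length_cons, Nat.pred_succ] at h2
    rw [h2, ih]
    by_cases hab : a = b <;> simp [hab, Nat.add_comm]

-- A's counting loop over pyRange computes adjCount
theorem foldl_count_adj (m : List Int) (a : Int) :
    (PySem.List.pyRange 0 ((m.length : Int) - 1) 1).foldl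
      (fun s i => if PySem.List.pyGetD m i 0 = PySem.List.pyGetD m (i + 1) 0 then s + 1 else s) a
      = a + adjCount m := by
  rw [PySem.List.foldl_ite_add_one]
  congr 1
  rw [PySem.List.pyRange_one]
  simp only [List.countP_map]
  rw [← countP_range_adj m]
  have hlen : (((m.length : Int) - 1 - 0).toNat) = m.length - 1 := by omega
  rw [hlen]
  congr 1
  apply List.countP_congr
  intro k _
  simp only [Function.comp, zero_add, ← Nat.cast_add_one, PySem.List.pyGetD_natCast]

-- for a ≤-sorted list, adjacent duplicates + distinct values = length
theorem adj_add_card (m : List Int) (hs : m.Pairwise (· ≤ ·)) :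
    adjCount m + m.toFinset.card = m.length := by
  match m with
  | [] => simp [adjCount]
  | [a] => simp [adjCount]
  | a :: b :: t =>
    have hs' : (b :: t).Pairwise (· ≤ ·) := hs.tail
    have ih := adj_add_card (b :: t) hs'
    have hab : a ≤ b := (List.pairwise_cons.mp hs).1 b (by simp)
    have hadj : adjCount (a :: b :: t) = (if a = b then 1 else 0) + adjCount (b :: t) := rfl
    by_cases h : a = b
    · have hmem : a ∈ (b :: t).toFinset := by simp [h]
      rw [hadj, if_pos h, List.toFinset_cons, Finset.insert_eq_self.mpr hmem, List.length_cons]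
      omega
    · have hnot : a ∉ (b :: t).toFinset := by
        simp only [List.mem_toFinset, List.mem_cons]
        rintro (rfl | hmem)
        · exact h rfl
        · have hby : b ≤ a := (List.pairwise_cons.mp hs').1 a hmem
          exact h (le_antisymm hab hby)
      rw [hadj, if_neg h, List.toFinset_cons, Finset.card_insert_of_notMem hnot, List.length_cons]
      omega

-- len(set(L)) is the number of distinct elements of L
theorem ofList_length_eq_card (L : List Int) :
    (PySem.Set.ofList L).length = L.toFinset.card := by
  have hnd : (PySem.Set.ofList L).Nodup := PySem.Set.nodup_ofList L
  have hts : (PySem.Set.ofList L).toFinset = L.toFinset := by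
    ext y; simp [PySem.Set.mem_ofList]
  calc (PySem.Set.ofList L).length = (PySem.Set.ofList L).toFinset.card := (List.toFinset_card_of_nodup hnd).symm
    _ = L.toFinset.card := by rw [hts]

-- the two helpers agree everywhere
theorem cardinalun_eq_shares1 (c x : List Int) : cardinalun c x = shares1 c x := by
  show ((PySem.List.pyRange 0 (((PySem.List.sorted (c ++ x) (fun x => x) false).length : Int) - 1) 1).foldl
    (fun s i => if PySem.List.pyGetD (PySem.List.sorted (c ++ x) (fun x => x) false) i 0 = PySem.List.pyGetD (PySem.List.sorted (c ++ x) (fun x => x) false) (i + 1) 0 then s + 1 else s) 0 == 1)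
    = (((c.length : Int) + (x.length : Int) - ((PySem.Set.ofList (c ++ x)).length : Int)) == 1)
  set m := PySem.List.sorted (c ++ x) (fun x => x) false with hm
  rw [foldl_count_adj m 0]
  have hperm : m.Perm (c ++ x) := PySem.List.sorted_perm _ _ _
  have hlen : m.length = c.length + x.length := by
    rw [hperm.length_eq, List.length_append]
  have hts : m.toFinset = (c ++ x).toFinset := by ext y; simp [hperm.mem_iff]
  have hpw : m.Pairwise (· ≤ ·) := PySem.List.sorted_pairwise (c ++ x) (fun x => x)
  have hadj := adj_add_card m hpw
  have hcard : (PySem.Set.ofList (c ++ x)).length = m.toFinset.card := by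
    rw [ofList_length_eq_card, hts]
  have hle : m.toFinset.card ≤ m.length := List.toFinset_card_le m
  have hint : (0 : Int) + adjCount m = (c.length : Int) + (x.length : Int) - ((PySem.Set.ofList (c ++ x)).length : Int) := by
    rw [hcard]
    omega
  rw [hint]

-- the inner while loop with booll2 already False returns immediately
theorem innerA_false (l : List (List Int)) (c : List Int) (n k : Int) :
    innerA l c n k false = (false, k) := by
  unfold innerA; simp

-- the inner while loop's exit condition is all()
theorem innerA_spec (l : List (List Int)) (c : List Int) (k : Nat) (hk : k ≤ l.length) :
    (let r := innerA l c (l.length : Int) (k : Int) true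
     decide (r.1 = true ∧ r.2 = (l.length : Int)))
      = (l.drop k).all (fun x => cardinalun c x) := by
  by_cases h : k < l.length
  · rw [innerA]
    have hd : (l.drop k) = l[k] :: l.drop (k + 1) := List.drop_eq_getElem_cons h
    have hget : PySem.List.pyGetD l (k : Int) [] = l[k] := by
      simp [PySem.List.pyGetD_natCast, List.getD_eq_getElem?_getD, h]
    rw [dif_pos (by constructor <;> [exact_mod_cast h; rfl])]
    simp only [hget]
    by_cases hc : cardinalun c l[k] = true
    · have ih := innerA_spec l c (k + 1) (by omega)
      simp only [hc, not_true_eq_false, if_false]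
      rw [show ((k : Int) + 1) = ((k + 1 : Nat) : Int) by push_cast; ring]
      rw [ih]
      rw [hd, List.all_cons, hc, Bool.true_and]
    · simp only [hc]
      rw [if_pos (by simp [hc])]
      rw [innerA_false, hd, List.all_cons]
      simp [hc]

  · have hkl : k = l.length := by omega
    subst hkl
    rw [innerA]
    rw [dif_neg (by simp)]
    simp
termination_by l.length - k
decreasing_by omega

-- the outer loops agree (on in-range starting indices)
theorem outer_eq (l g : List (List Int)) (i : Int) (hi : -(g.length : Int) ≤ i) :
    (match (outerA l g (l.length : Int) (g.length : Int) i).2 with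
      | some s => (l ++ [s], (outerA l g (l.length : Int) (g.length : Int) i).1)
      | none => (l, (outerA l g (l.length : Int) (g.length : Int) i).1))
      = (match bloop l g (PySem.List.pyRange i (g.length : Int) 1) with
          | some r => r
          | none => (l, max i (g.length : Int))) := by
  by_cases hlt : i < (g.length : Int)
  · obtain ⟨c, hc⟩ : ∃ c, PySem.List.pyGet? g i = some c := by
      cases hgc : PySem.List.pyGet? g i with
      | none =>
        exfalso
        have := (PySem.List.pyGet?_eq_none_iff (xs := g) (i := i)).mp hgc
        exact this (by constructor <;> omega)
      | some c => exact ⟨c, rfl⟩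
    rw [PySem.List.pyRange_one_cons hlt]
    rw [outerA, dif_pos hlt, hc]
    show (match
        (if (innerA l c (l.length : Int) 0 true).1 = true ∧ (innerA l c (l.length : Int) 0 true).2 = (l.length : Int)
          then ((i : Int), some c)
          else outerA l g (l.length : Int) (g.length : Int) (i + 1)).2 with
      | some s => (l ++ [s],
        (if (innerA l c (l.length : Int) 0 true).1 = true ∧ (innerA l c (l.length : Int) 0 true).2 = (l.length : Int)
          then ((i : Int), some c)
          else outerA l g (l.length : Int) (g.length : Int) (i + 1)).1)
      | none => (l,
        (if (innerA l c (l.length : Int) 0 true).1 = true ∧ (innerA l c (l.length : Int) 0 true).2 = (l.length : Int)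
          then ((i : Int), some c)
          else outerA l g (l.length : Int) (g.length : Int) (i + 1)).1)) = _
    have hdec : decide ((innerA l c (l.length : Int) 0 true).1 = true ∧ (innerA l c (l.length : Int) 0 true).2 = (l.length : Int))
        = l.all (fun x => shares1 c x) := by
      have h0 := innerA_spec l c 0 (Nat.zero_le _)
      simp only [Nat.cast_zero, List.drop_zero] at h0
      rw [h0]
      simp only [cardinalun_eq_shares1]
    by_cases hP : (innerA l c (l.length : Int) 0 true).1 = true ∧ (innerA l c (l.length : Int) 0 true).2 = (l.length : Int)
    · have hall : l.all (fun x => shares1 c x) = true := by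
        rw [← hdec]; exact decide_eq_true hP
      rw [if_pos hP]
      show (l ++ [c], i) = _
      simp only [bloop, hc, hall, if_true]
    · have hall : l.all (fun x => shares1 c x) = false := by
        rw [← hdec]; exact decide_eq_false hP
      have ih := outer_eq l g (i + 1) (by omega)
      have hmax : max (i + 1) (g.length : Int) = max i (g.length : Int) := by omega
      rw [hmax] at ih
      rw [if_neg hP]
      rw [ih]
      simp [bloop, hc, hall]
  · rw [outerA, dif_neg hlt]
    rw [PySem.List.pyRange_one_eq_nil (by omega)]
    show (l, i) = (l, max i (g.length : Int))
    have : max i (g.length : Int) = i := by omega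
    rw [this]
termination_by ((g.length : Int) - i).toNat
decreasing_by omega

-- ===== VERDICT (by name: the statement is the Claim_ definition above) =====
theorem algorithmerajoute3_spec : Claim_equal_algorithmerajoute3 := by
  intro l j g _hd hpre
  unfold Spec_algorithmerajoute3 algorithmerajoute3 algorithmerajoute3_alt
  exact outer_eq l g j hpre
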